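-- pv_equiv track=rewrite | github.com/ccc612/problem_solving | google_code_jam/2019/QR1_ForehoneSolution.py | divide_four
-- ===== SOURCE A (Python) =====
-- def divide_four(num):
--     num1 = ''
--     num2 = ''
--
--     for ch in num:
--         if ch is '4':
--             num1 += '2'
--             num2 += '2'
--         else:
--             num1 += ch
--             if len(num2) != 0:
--                 num2 += '0'
--     return num1 + ' ' + num2
-- ===== SOURCE B (Python) =====
-- def divide_four(num):
--     num1 = num.replace('4', '2')
--     i = 0
--     n = len(num)
--     while i < n and num[i] != '4':
--         i += 1
--     num2 = ''.join('2' if c == '4' else '0' for c in num[i:])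
--     return num1 + ' ' + num2
-- ===== Notes on version B (the rewrite author's own statement) =====
-- stated objective: simpler
-- what changed: Replaces A's single fused loop maintaining two growing strings with a stateful emptiness guard by three independent steps: str.replace for num1, a scan to the first '4', and a mapped join over the tail for num2.
import Mathlib
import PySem

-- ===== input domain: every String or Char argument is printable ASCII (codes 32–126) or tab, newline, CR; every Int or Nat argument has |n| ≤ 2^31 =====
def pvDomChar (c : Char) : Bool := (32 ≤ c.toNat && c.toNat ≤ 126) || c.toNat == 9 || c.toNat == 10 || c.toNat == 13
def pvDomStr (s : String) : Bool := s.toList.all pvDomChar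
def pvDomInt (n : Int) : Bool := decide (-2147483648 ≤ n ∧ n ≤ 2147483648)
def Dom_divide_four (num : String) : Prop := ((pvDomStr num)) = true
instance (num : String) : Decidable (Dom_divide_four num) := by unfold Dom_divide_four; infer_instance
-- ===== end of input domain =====

-- B replaces A's fused two-accumulator loop by replace + scan-to-first-'4' + mapped tail (objective: simpler).

-- ===== PORT A =====
-- `ch is '4'` behaves as `ch == '4'` for single interned characters iterated from a str.
-- aStep is A's loop body: one iteration updating (num1, num2)
def aStep (acc : List Char × List Char) (ch : Char) : List Char × List Char :=
  if ch = '4' then (acc.1 ++ ['2'], acc.2 ++ ['2'])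
  else (acc.1 ++ [ch], if acc.2.length ≠ 0 then acc.2 ++ ['0'] else acc.2)

def divide_four (num : String) : String :=
  let r := num.toList.foldl aStep ([], [])
  String.mk (r.1 ++ ' ' :: r.2)

-- ===== PORT B =====
-- the while loop advancing i past non-'4' chars, as structural recursion returning num[i:]
def b4Scan : List Char → List Char
  | [] => []
  | c :: cs => if c ≠ '4' then b4Scan cs else c :: cs

def divide_four_alt (num : String) : String :=
  let num1 := num.toList.map (fun c => if c = '4' then '2' else c)
  let num2 := (b4Scan num.toList).map (fun c => if c = '4' then '2' else '0')
  String.mk (num1 ++ ' ' :: num2)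

-- ===== PRECONDITION & SPEC =====
def Spec_divide_four (num : String) (out : String) : Prop := out = divide_four_alt num
instance (num : String) (out : String) : Decidable (Spec_divide_four num out) := by unfold Spec_divide_four; infer_instance

-- ===== CLAIM (what is proved, stated in full; the proofs are below) =====
def Claim_equal_divide_four : Prop := ∀ (num : String), Dom_divide_four num → Spec_divide_four num (divide_four num)

-- ===== LEMMAS AND PROOFS =====

lemma foldl_fst (s : List Char) : ∀ a1 a2 : List Char,
    (s.foldl aStep (a1, a2)).1 = a1 ++ s.map (fun c => if c = '4' then '2' else c) := by
  induction s with
  | nil => simp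
  | cons c cs ih =>
    intro a1 a2
    by_cases h : c = '4' <;> simp [aStep, h, ih, List.append_assoc]

lemma foldl_snd_ne (s : List Char) : ∀ a1 a2 : List Char, a2 ≠ [] →
    (s.foldl aStep (a1, a2)).2 = a2 ++ s.map (fun c => if c = '4' then '2' else '0') := by
  induction s with
  | nil => simp
  | cons c cs ih =>
    intro a1 a2 h
    by_cases hc : c = '4'
    · subst hc
      rw [List.foldl_cons, show aStep (a1, a2) '4' = (a1 ++ ['2'], a2 ++ ['2']) by simp [aStep],
          ih _ _ (by simp)]
      simp
    · have hlen : a2.length ≠ 0 := by simpa [List.length_eq_zero_iff] using h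
      rw [List.foldl_cons, show aStep (a1, a2) c = (a1 ++ [c], a2 ++ ['0']) by simp [aStep, hc, hlen],
          ih _ _ (by simp)]
      simp [hc]

lemma foldl_snd_nil (s : List Char) : ∀ a1 : List Char,
    (s.foldl aStep (a1, [])).2 = (b4Scan s).map (fun c => if c = '4' then '2' else '0') := by
  induction s with
  | nil => simp [b4Scan]
  | cons c cs ih =>
    intro a1
    by_cases hc : c = '4'
    · subst hc
      rw [List.foldl_cons, show aStep (a1, []) '4' = (a1 ++ ['2'], ['2']) by simp [aStep],
          foldl_snd_ne cs _ ['2'] (by simp)]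
      simp [b4Scan]
    · rw [List.foldl_cons, show aStep (a1, []) c = (a1 ++ [c], []) by simp [aStep, hc]]
      simpa [b4Scan, hc] using ih (a1 ++ [c])

-- ===== VERDICT (by name: the statement is the Claim_ definition above) =====
theorem divide_four_spec : Claim_equal_divide_four := by
  intro num _
  unfold Spec_divide_four divide_four divide_four_alt
  simp [foldl_fst num.toList [] [], foldl_snd_nil num.toList []]
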